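-- pv_equiv track=rewrite | github.com/AntonioAlgaida/SkullKingAI | src/memory/reflector.py | _find_critical_trick_with_index
-- ===== SOURCE A (Python) =====
-- from typing import Dict, List, Optional, Tuple
--
-- def _find_critical_trick_with_index(
--     pid: int, bid: int, won: int, tricks: List[Dict]
-- ) -> Tuple[Optional[Dict], int]:
--     """
--     Returns (critical_trick, index_in_tricks_list).
--     For over-bid (won > bid): the (bid+1)th trick won by pid — the one that pushed them over.
--     For under-bid (won < bid): the last trick in the round where pid did NOT win.
--     """
--     if won > bid:
--         pid_wins = 0
--         for i, trick in enumerate(tricks):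
--             if trick.get("winner") == pid:
--                 pid_wins += 1
--                 if pid_wins == bid + 1:
--                     return trick, i
--     else:
--         last_miss, last_idx = None, -1
--         for i, trick in enumerate(tricks):
--             if trick.get("winner") != pid:
--                 last_miss, last_idx = trick, i
--         return last_miss, last_idx
--
--     return None, -1
-- ===== SOURCE B (Python) =====
-- from typing import Dict, List, Optional, Tuple
--
-- def _find_critical_trick_with_index(
--     pid: int, bid: int, won: int, tricks: List[Dict]
-- ) -> Tuple[Optional[Dict], int]:
--     """Back-to-front selection: count pid's wins once, then scan the round in
--     REVERSE, returning the first hit. For over-bid the (bid+1)th win from the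
--     front is the (total_wins - bid)th win from the back; for under-bid the last
--     non-win is simply the first non-win seen when walking backwards."""
--     if won > bid:
--         need = sum(1 for t in tricks if t.get("winner") == pid) - bid
--         for i in range(len(tricks) - 1, -1, -1):
--             if tricks[i].get("winner") == pid:
--                 need -= 1
--                 if need == 0:
--                     return tricks[i], i
--     else:
--         for i in range(len(tricks) - 1, -1, -1):
--             if tricks[i].get("winner") != pid:
--                 return tricks[i], i
--     return None, -1
-- ===== Notes on version B (the rewrite author's own statement) =====
-- stated objective: alternative
-- what changed: A scans forward with accumulators (a win counter with early exit / a track-last-miss pair); B instead counts pid's wins in one pass and then scans the round back-to-front, returning the first qualifying trick from the end (the (total_wins-bid)th win from the back, resp. the first non-win from the back).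
import Mathlib
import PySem

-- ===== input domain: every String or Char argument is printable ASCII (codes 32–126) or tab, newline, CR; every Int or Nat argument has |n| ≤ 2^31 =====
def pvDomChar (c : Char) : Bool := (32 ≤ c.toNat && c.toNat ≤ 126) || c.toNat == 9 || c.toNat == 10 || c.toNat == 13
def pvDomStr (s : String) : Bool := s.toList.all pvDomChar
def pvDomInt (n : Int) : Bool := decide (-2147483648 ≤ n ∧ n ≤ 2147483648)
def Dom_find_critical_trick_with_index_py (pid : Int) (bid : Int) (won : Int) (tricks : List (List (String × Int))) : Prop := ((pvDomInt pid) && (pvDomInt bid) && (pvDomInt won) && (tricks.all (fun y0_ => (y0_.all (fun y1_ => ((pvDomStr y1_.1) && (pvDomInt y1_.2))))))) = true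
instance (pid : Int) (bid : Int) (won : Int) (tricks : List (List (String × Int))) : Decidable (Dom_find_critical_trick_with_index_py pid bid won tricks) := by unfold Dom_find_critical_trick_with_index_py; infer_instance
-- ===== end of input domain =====

-- B replaces A's forward accumulator scans by a count pass plus a back-to-front scan
-- with early exit ((total_wins - bid)th win from the back / first non-win from the back);
-- objective: alternative (same O(n) cost, different traversal).

-- ===== PORT A =====
-- trick.get("winner"): first-match lookup in the association list (dict convention)
def pvWinner (trick : List (String × Int)) : Option Int :=
  (trick.find? (fun kv => kv.1 == "winner")).map (·.2)

-- the over-bid loop of A: early return when the counter hits bid+1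
def pvOverLoop (pid bid : Int) : List (Int × List (String × Int)) → Int → (Option (List (String × Int))) × Int
  | [], _ => (none, -1)
  | (i, trick) :: rest, pid_wins =>
    if pvWinner trick == some pid then
      if pid_wins + 1 == bid + 1 then (some trick, i)
      else pvOverLoop pid bid rest (pid_wins + 1)
    else pvOverLoop pid bid rest pid_wins

def find_critical_trick_with_index_py (pid : Int) (bid : Int) (won : Int) (tricks : List (List (String × Int))) : (Option (List (String × Int))) × Int :=
  if won > bid then
    pvOverLoop pid bid (PySem.List.enumerate tricks) 0
  else
    (PySem.List.enumerate tricks).foldl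
      (fun acc it => if !(pvWinner it.2 == some pid) then (some it.2, it.1) else acc)
      (none, -1)

-- ===== PORT B =====
-- B's reverse scan for the over-bid branch: decrement `need` on each win, stop at 0
def pvRevNeed (pid : Int) : List (Int × List (String × Int)) → Int → (Option (List (String × Int))) × Int
  | [], _ => (none, -1)
  | (i, t) :: rest, need =>
    if pvWinner t == some pid then
      if need - 1 == 0 then (some t, i) else pvRevNeed pid rest (need - 1)
    else pvRevNeed pid rest need

-- B's reverse scan for the under-bid branch: first non-win from the back
def pvRevFirst (pid : Int) : List (Int × List (String × Int)) → (Option (List (String × Int))) × Int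
  | [] => (none, -1)
  | (i, t) :: rest =>
    if !(pvWinner t == some pid) then (some t, i) else pvRevFirst pid rest

def find_critical_trick_with_index_py_alt (pid : Int) (bid : Int) (won : Int) (tricks : List (List (String × Int))) : (Option (List (String × Int))) × Int :=
  if won > bid then
    pvRevNeed pid ((PySem.List.enumerate tricks).reverse)
      ((tricks.countP (fun t => pvWinner t == some pid) : Int) - bid)
  else
    pvRevFirst pid ((PySem.List.enumerate tricks).reverse)

-- ===== PRECONDITION & SPEC =====
def Spec_find_critical_trick_with_index_py (pid : Int) (bid : Int) (won : Int) (tricks : List (List (String × Int))) (out : (Option (List (String × Int))) × Int) : Prop := out = find_critical_trick_with_index_py_alt pid bid won tricks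
instance (pid : Int) (bid : Int) (won : Int) (tricks : List (List (String × Int))) (out : (Option (List (String × Int))) × Int) : Decidable (Spec_find_critical_trick_with_index_py pid bid won tricks out) := by unfold Spec_find_critical_trick_with_index_py; infer_instance

-- ===== CLAIM (what is proved, stated in full; the proofs are below) =====
def Claim_equal_find_critical_trick_with_index_py : Prop := ∀ (pid : Int) (bid : Int) (won : Int) (tricks : List (List (String × Int))), Dom_find_critical_trick_with_index_py pid bid won tricks → Spec_find_critical_trick_with_index_py pid bid won tricks (find_critical_trick_with_index_py pid bid won tricks)

-- ===== LEMMAS AND PROOFS =====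

theorem pvGetLast?_cons_ne {α : Type} (x : α) (l : List α) (h : l ≠ []) :
    (x :: l).getLast? = l.getLast? := by
  cases l with
  | nil => simp at h
  | cons a as => simp [List.getLast?_cons]

-- A's over-bid counting loop = index (bid - c) into the filtered list
theorem pvOverLoop_eq (pid bid : Int) (l : List (Int × List (String × Int))) (c : Int) :
    pvOverLoop pid bid l c =
      (if 0 ≤ bid - c ∧ bid - c < ((l.filter (fun it => pvWinner it.2 == some pid)).length : Int) then
        match (l.filter (fun it => pvWinner it.2 == some pid))[(bid - c).toNat]? with
        | some (i, t) => (some t, i)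
        | none => (none, -1)
      else (none, -1)) := by
  induction l generalizing c with
  | nil => simp [pvOverLoop]
  | cons hd tl ih =>
    obtain ⟨i, t⟩ := hd
    by_cases hp : pvWinner t == some pid
    · rw [show pvOverLoop pid bid ((i, t) :: tl) c =
        (if c + 1 == bid + 1 then (some t, i) else pvOverLoop pid bid tl (c + 1)) from by
          simp [pvOverLoop, hp]]
      have hf : List.filter (fun it => pvWinner it.2 == some pid) ((i, t) :: tl) =
          (i, t) :: List.filter (fun it => pvWinner it.2 == some pid) tl := by
        simp [hp]
      rw [hf]
      by_cases hc : c = bid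
      · subst hc
        simp
      · have hne : ¬ (c + 1 == bid + 1) := by simp; omega
        rw [if_neg (by simpa using hne), ih (c + 1)]
        by_cases hlt : 0 ≤ bid - (c + 1) ∧ bid - (c + 1) < ((tl.filter (fun it => pvWinner it.2 == some pid)).length : Int)
        · rw [if_pos hlt, if_pos (by simp only [List.length_cons]; push_cast; omega)]
          have h1 : (bid - c).toNat = (bid - (c + 1)).toNat + 1 := by omega
          rw [h1, List.getElem?_cons_succ]
        · rw [if_neg hlt, if_neg (by simp only [List.length_cons]; push_cast at hlt ⊢; omega)]
    · rw [show pvOverLoop pid bid ((i, t) :: tl) c = pvOverLoop pid bid tl c from by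
        simp [pvOverLoop, hp]]
      have hf : List.filter (fun it => pvWinner it.2 == some pid) ((i, t) :: tl) =
          List.filter (fun it => pvWinner it.2 == some pid) tl := by
        simp [hp]
      rw [hf, ih c]

-- A's track-last loop = getLast? of the filtered list
theorem pvLastLoop_eq (pid : Int) (l : List (Int × List (String × Int)))
    (init : (Option (List (String × Int))) × Int) :
    l.foldl (fun acc it => if !(pvWinner it.2 == some pid) then (some it.2, it.1) else acc) init =
      (match (l.filter (fun it => !(pvWinner it.2 == some pid))).getLast? with
       | some (i, t) => (some t, i)
       | none => init) := by
  induction l generalizing init with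
  | nil => simp
  | cons hd tl ih =>
    obtain ⟨i, t⟩ := hd
    by_cases hp : !(pvWinner t == some pid)
    · have hf : List.filter (fun it => !(pvWinner it.2 == some pid)) ((i, t) :: tl) =
          (i, t) :: List.filter (fun it => !(pvWinner it.2 == some pid)) tl := by
        simp only [List.filter_cons, hp, if_true]
      rw [List.foldl_cons, if_pos hp, ih, hf]
      cases h : (tl.filter (fun it => !(pvWinner it.2 == some pid))).getLast? with
      | none =>
        have := List.getLast?_eq_none_iff.mp h
        simp [this]
      | some p =>
        have hne : tl.filter (fun it => !(pvWinner it.2 == some pid)) ≠ [] := by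
          intro hnil; rw [hnil] at h; simp at h
        rw [pvGetLast?_cons_ne _ _ hne, h]
    · have hf : List.filter (fun it => !(pvWinner it.2 == some pid)) ((i, t) :: tl) =
          List.filter (fun it => !(pvWinner it.2 == some pid)) tl := by
        simp only [List.filter_cons, hp, if_false, Bool.false_eq_true]
      rw [List.foldl_cons, if_neg hp, ih, hf]

-- B's reverse first-match = head? of the filtered list
theorem pvRevFirst_eq (pid : Int) (m : List (Int × List (String × Int))) :
    pvRevFirst pid m =
      (match (m.filter (fun it => !(pvWinner it.2 == some pid))).head? with
       | some (i, t) => (some t, i)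
       | none => (none, -1)) := by
  induction m with
  | nil => simp [pvRevFirst]
  | cons hd tl ih =>
    obtain ⟨i, t⟩ := hd
    by_cases hp : !(pvWinner t == some pid)
    · simp [pvRevFirst, hp]
    · simp only [pvRevFirst, hp, if_false, Bool.false_eq_true, List.filter_cons]
      rw [ih]
  
-- B's reverse countdown scan = index (need - 1) into the filtered list
theorem pvRevNeed_eq (pid : Int) (m : List (Int × List (String × Int))) (need : Int) :
    pvRevNeed pid m need =
      (if 1 ≤ need ∧ need ≤ ((m.filter (fun it => pvWinner it.2 == some pid)).length : Int) then
        match (m.filter (fun it => pvWinner it.2 == some pid))[(need - 1).toNat]? with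
        | some (i, t) => (some t, i)
        | none => (none, -1)
      else (none, -1)) := by
  induction m generalizing need with
  | nil => simp [pvRevNeed]
  | cons hd tl ih =>
    obtain ⟨i, t⟩ := hd
    by_cases hp : pvWinner t == some pid
    · have hf : List.filter (fun it => pvWinner it.2 == some pid) ((i, t) :: tl) =
          (i, t) :: List.filter (fun it => pvWinner it.2 == some pid) tl := by
        simp [hp]
      rw [show pvRevNeed pid ((i, t) :: tl) need =
        (if need - 1 == 0 then (some t, i) else pvRevNeed pid tl (need - 1)) from by
          simp [pvRevNeed, hp]]
      rw [hf]
      by_cases h1 : need = 1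
      · subst h1; simp
      · rw [if_neg (by simp; omega), ih (need - 1)]
        by_cases hlt : 1 ≤ need - 1 ∧ need - 1 ≤ ((tl.filter (fun it => pvWinner it.2 == some pid)).length : Int)
        · rw [if_pos hlt, if_pos (by simp only [List.length_cons]; push_cast; omega)]
          have h2 : (need - 1).toNat = (need - 1 - 1).toNat + 1 := by omega
          rw [h2, List.getElem?_cons_succ]
        · rw [if_neg hlt, if_neg (by simp only [List.length_cons]; push_cast at hlt ⊢; omega)]
    · have hf : List.filter (fun it => pvWinner it.2 == some pid) ((i, t) :: tl) =
          List.filter (fun it => pvWinner it.2 == some pid) tl := by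
        simp [hp]
      rw [show pvRevNeed pid ((i, t) :: tl) need = pvRevNeed pid tl need from by
        simp [pvRevNeed, hp]]
      rw [hf, ih need]

-- the count over tricks = length of the filter over the enumerated list
theorem pvCount_eq (pid : Int) (tricks : List (List (String × Int))) :
    tricks.countP (fun t => pvWinner t == some pid) =
      ((PySem.List.enumerate tricks).filter (fun it => pvWinner it.2 == some pid)).length := by
  rw [← List.countP_eq_length_filter]
  have h : tricks = (PySem.List.enumerate tricks).map (·.2) :=
    (PySem.List.map_snd_enumerate tricks 0).symm
  conv_lhs => rw [h]
  rw [List.countP_map]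
  rfl

-- ===== VERDICT (by name: the statement is the Claim_ definition above) =====
theorem find_critical_trick_with_index_py_spec : Claim_equal_find_critical_trick_with_index_py := by
  intro pid bid won tricks _
  unfold Spec_find_critical_trick_with_index_py
  unfold find_critical_trick_with_index_py find_critical_trick_with_index_py_alt
  by_cases hw : won > bid
  · rw [if_pos hw, if_pos hw, pvOverLoop_eq, pvRevNeed_eq, pvCount_eq pid tricks]
    rw [List.filter_reverse, List.length_reverse]
    set wins := (PySem.List.enumerate tricks).filter (fun it => pvWinner it.2 == some pid) with hwins
    set W := wins.length with hW
    simp only [sub_zero]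
    by_cases hb : 0 ≤ bid ∧ bid < (W : Int)
    · rw [if_pos hb, if_pos (by omega)]
      have hidx : ((W : Int) - bid - 1).toNat < W := by omega
      rw [List.getElem?_reverse hidx]
      have : W - 1 - ((W : Int) - bid - 1).toNat = bid.toNat := by omega
      rw [this]
    · rw [if_neg hb, if_neg (by omega)]
  · rw [if_neg hw, if_neg hw, pvLastLoop_eq, pvRevFirst_eq, List.filter_reverse,
      List.head?_reverse]
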